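-- pv_equiv track=rewrite | github.com/sinclairpan-git/Ai_AutoSDLC | src/ai_sdlc/core/workitem_truth.py | _classify_paths
-- ===== SOURCE A (Python) =====
-- def _dedupe_text_items(values: object) -> list[str]:
--     deduped: list[str] = []
--     for value in values or []:
--         normalized = str(value).strip()
--         if normalized and normalized not in deduped:
--             deduped.append(normalized)
--     return deduped
--
-- def _classify_paths(paths: tuple[str, ...]) -> tuple[list[str], list[str], list[str], list[str]]:
--     code_paths: list[str] = []
--     test_paths: list[str] = []
--     doc_paths: list[str] = []
--     other_paths: list[str] = []
--     for path in paths: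
--         if path.startswith("src/"):
--             code_paths.append(path)
--         elif path.startswith("tests/"):
--             test_paths.append(path)
--         elif path.endswith(".md"):
--             doc_paths.append(path)
--         else:
--             other_paths.append(path)
--     return (
--         _dedupe_text_items(code_paths),
--         _dedupe_text_items(test_paths),
--         _dedupe_text_items(doc_paths),
--         _dedupe_text_items(other_paths),
--     )
-- ===== SOURCE B (Python) =====
-- def _classify_paths(paths):
--     code, test, doc, other = [], [], [], []
--     code_seen, test_seen, doc_seen, other_seen = set(), set(), set(), set()
--     for path in paths:
--         normalized = str(path).strip()
--         if path.startswith("src/"):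
--             lst, seen = code, code_seen
--         elif path.startswith("tests/"):
--             lst, seen = test, test_seen
--         elif path.endswith(".md"):
--             lst, seen = doc, doc_seen
--         else:
--             lst, seen = other, other_seen
--         if normalized and normalized not in seen:
--             lst.append(normalized)
--             seen.add(normalized)
--     return (code, test, doc, other)
-- ===== Notes on version B (the rewrite author's own statement) =====
-- stated objective: faster
-- what changed: Fuses A's classify pass plus four quadratic membership-scan dedup passes into one single pass that keeps, per category, a result list and a seen-set, so the inner 'not in deduped' list scan disappears.
import Mathlib
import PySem

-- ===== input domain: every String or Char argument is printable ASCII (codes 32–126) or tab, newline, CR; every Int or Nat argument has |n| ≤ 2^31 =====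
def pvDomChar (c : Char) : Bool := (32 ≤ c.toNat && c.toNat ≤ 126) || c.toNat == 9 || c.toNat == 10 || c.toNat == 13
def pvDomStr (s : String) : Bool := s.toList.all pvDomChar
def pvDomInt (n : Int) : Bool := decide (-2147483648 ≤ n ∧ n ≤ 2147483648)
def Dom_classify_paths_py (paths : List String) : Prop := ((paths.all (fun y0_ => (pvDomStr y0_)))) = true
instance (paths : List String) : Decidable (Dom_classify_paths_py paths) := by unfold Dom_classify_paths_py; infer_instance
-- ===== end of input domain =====

-- B fuses A's classify pass and its four quadratic membership-scan dedupe passes into one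
-- single pass keeping a result list and a seen-set per category (objective: faster).


-- ===== PORT A =====
def pvDedupeStep (deduped : List String) (value : String) : List String :=
  let normalized := PySem.Str.strip value
  if !(normalized == "") && !(deduped.contains normalized) then deduped ++ [normalized]
  else deduped

def pvDedupeTextItems (values : List String) : List String :=
  values.foldl pvDedupeStep []

def pvClassifyStep (s : List String × List String × List String × List String) (path : String) :
    List String × List String × List String × List String :=
  if PySem.Str.startswith path "src/" then (s.1 ++ [path], s.2.1, s.2.2.1, s.2.2.2)
  else if PySem.Str.startswith path "tests/" then (s.1, s.2.1 ++ [path], s.2.2.1, s.2.2.2)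
  else if PySem.Str.endswith path ".md" then (s.1, s.2.1, s.2.2.1 ++ [path], s.2.2.2)
  else (s.1, s.2.1, s.2.2.1, s.2.2.2 ++ [path])

def classify_paths_py (paths : List String) : List String × List String × List String × List String :=
  let r := paths.foldl pvClassifyStep ([], [], [], [])
  (pvDedupeTextItems r.1, pvDedupeTextItems r.2.1, pvDedupeTextItems r.2.2.1, pvDedupeTextItems r.2.2.2)

-- ===== PORT B =====
def pvBump (pair : List String × PySem.Set String) (n : String) : List String × PySem.Set String :=
  if !(n == "") && !(PySem.Set.contains pair.2 n) then (pair.1 ++ [n], PySem.Set.add pair.2 n)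
  else pair

def pvBStep
    (s : (List String × PySem.Set String) × (List String × PySem.Set String) ×
         (List String × PySem.Set String) × (List String × PySem.Set String)) (path : String) :
    (List String × PySem.Set String) × (List String × PySem.Set String) ×
    (List String × PySem.Set String) × (List String × PySem.Set String) :=
  let n := PySem.Str.strip path
  if PySem.Str.startswith path "src/" then (pvBump s.1 n, s.2.1, s.2.2.1, s.2.2.2)
  else if PySem.Str.startswith path "tests/" then (s.1, pvBump s.2.1 n, s.2.2.1, s.2.2.2)
  else if PySem.Str.endswith path ".md" then (s.1, s.2.1, pvBump s.2.2.1 n, s.2.2.2)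
  else (s.1, s.2.1, s.2.2.1, pvBump s.2.2.2 n)

def classify_paths_py_alt (paths : List String) : List String × List String × List String × List String :=
  let r := paths.foldl pvBStep (([], []), ([], []), ([], []), ([], []))
  (r.1.1, r.2.1.1, r.2.2.1.1, r.2.2.2.1)

-- ===== PRECONDITION & SPEC =====
def Spec_classify_paths_py (paths : List String) (out : List String × List String × List String × List String) : Prop := out = classify_paths_py_alt paths
instance (paths : List String) (out : List String × List String × List String × List String) : Decidable (Spec_classify_paths_py paths out) := by unfold Spec_classify_paths_py; infer_instance

-- ===== CLAIM (what is proved, stated in full; the proofs are below) =====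
def Claim_equal_classify_paths_py : Prop := ∀ (paths : List String), Dom_classify_paths_py paths → Spec_classify_paths_py paths (classify_paths_py paths)

-- ===== LEMMAS AND PROOFS =====
def pvP1 (p : String) : Bool := PySem.Str.startswith p "src/"
def pvP2 (p : String) : Bool := !pvP1 p && PySem.Str.startswith p "tests/"
def pvP3 (p : String) : Bool := !pvP1 p && !PySem.Str.startswith p "tests/" && PySem.Str.endswith p ".md"
def pvP4 (p : String) : Bool := !pvP1 p && !PySem.Str.startswith p "tests/" && !PySem.Str.endswith p ".md"

theorem pv_classify_fold (paths : List String) :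
    ∀ (c t d o : List String),
      paths.foldl pvClassifyStep (c, t, d, o) =
        (c ++ paths.filter pvP1, t ++ paths.filter pvP2,
         d ++ paths.filter pvP3, o ++ paths.filter pvP4) := by
  induction paths with
  | nil => intro c t d o; simp
  | cons p ps ih =>
    intro c t d o
    simp only [List.foldl_cons, pvClassifyStep, List.filter_cons, pvP1, pvP2, pvP3, pvP4]
    by_cases h1 : PySem.Str.startswith p "src/" = true <;>
      by_cases h2 : PySem.Str.startswith p "tests/" = true <;>
        by_cases h3 : PySem.Str.endswith p ".md" = true <;>
          simp only [h1, h2, h3, Bool.not_true, Bool.not_false, Bool.false_and, Bool.true_and,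
            Bool.and_false, Bool.and_true, Bool.and_self, if_true, if_false, Bool.false_eq_true,
            ih, List.append_assoc, List.singleton_append, Bool.not_eq_true] at * <;>
          simp [h1, h2, h3]

theorem pv_contains_eq {s : PySem.Set String} {l : List String}
    (h : ∀ x, x ∈ s ↔ x ∈ l) (n : String) : PySem.Set.contains s n = l.contains n := by
  rw [Bool.eq_iff_iff]
  simp [PySem.Set.contains_iff, List.contains_iff_mem, h]

theorem pv_bump_eq {s : PySem.Set String} {l : List String}
    (h : ∀ x, x ∈ s ↔ x ∈ l) (p : String) :
    (pvBump (l, s) (PySem.Str.strip p)).1 = pvDedupeStep l p ∧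
      (∀ x, x ∈ (pvBump (l, s) (PySem.Str.strip p)).2 ↔ x ∈ (pvBump (l, s) (PySem.Str.strip p)).1) := by
  simp only [pvBump, pvDedupeStep]
  rw [pv_contains_eq h]
  by_cases hcond : (!(PySem.Str.strip p == "") && !(l.contains (PySem.Str.strip p))) = true
  · rw [if_pos hcond, if_pos hcond]
    refine ⟨rfl, fun x => ?_⟩
    simp [PySem.Set.mem_add, h]
  · rw [if_neg hcond, if_neg hcond]
    exact ⟨rfl, h⟩

theorem pv_b_fold (paths : List String) :
    ∀ (c t d o : List String) (cs ts ds os : PySem.Set String),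
      (∀ x, x ∈ cs ↔ x ∈ c) → (∀ x, x ∈ ts ↔ x ∈ t) →
      (∀ x, x ∈ ds ↔ x ∈ d) → (∀ x, x ∈ os ↔ x ∈ o) →
      ((paths.foldl pvBStep ((c, cs), (t, ts), (d, ds), (o, os))).1.1,
       (paths.foldl pvBStep ((c, cs), (t, ts), (d, ds), (o, os))).2.1.1,
       (paths.foldl pvBStep ((c, cs), (t, ts), (d, ds), (o, os))).2.2.1.1,
       (paths.foldl pvBStep ((c, cs), (t, ts), (d, ds), (o, os))).2.2.2.1) =
        ((paths.filter pvP1).foldl pvDedupeStep c,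
         (paths.filter pvP2).foldl pvDedupeStep t,
         (paths.filter pvP3).foldl pvDedupeStep d,
         (paths.filter pvP4).foldl pvDedupeStep o) := by
  induction paths with
  | nil => intro c t d o cs ts ds os _ _ _ _; simp
  | cons p ps ih =>
    intro c t d o cs ts ds os hc ht hd ho
    simp only [List.foldl_cons, pvBStep, List.filter_cons, pvP1, pvP2, pvP3, pvP4]
    by_cases h1 : PySem.Str.startswith p "src/" = true
    · obtain ⟨he, hm⟩ := pv_bump_eq hc p
      rcases hq : pvBump (c, cs) (PySem.Str.strip p) with ⟨l', s'⟩
      rw [hq] at he hm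
      simp only [h1, Bool.not_true, Bool.false_and, Bool.and_false, if_true, if_false,
        Bool.false_eq_true, List.foldl_cons, hq]
      rw [← he]
      exact ih _ _ _ _ _ _ _ _ hm ht hd ho
    · by_cases h2 : PySem.Str.startswith p "tests/" = true
      · obtain ⟨he, hm⟩ := pv_bump_eq ht p
        rcases hq : pvBump (t, ts) (PySem.Str.strip p) with ⟨l', s'⟩
        rw [hq] at he hm
        simp only [h1, h2, Bool.not_true, Bool.not_false, Bool.false_and, Bool.true_and,
          Bool.and_false, Bool.and_true, if_true, if_false, Bool.false_eq_true,
          Bool.not_eq_true, List.foldl_cons, hq]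
        rw [← he]
        exact ih _ _ _ _ _ _ _ _ hc hm hd ho
      · by_cases h3 : PySem.Str.endswith p ".md" = true
        · obtain ⟨he, hm⟩ := pv_bump_eq hd p
          rcases hq : pvBump (d, ds) (PySem.Str.strip p) with ⟨l', s'⟩
          rw [hq] at he hm
          simp only [h1, h2, h3, Bool.not_true, Bool.not_false, Bool.false_and, Bool.true_and,
            Bool.and_false, Bool.and_true, Bool.and_self, if_true, if_false, Bool.false_eq_true,
            Bool.not_eq_true, List.foldl_cons, hq]
          rw [← he]
          exact ih _ _ _ _ _ _ _ _ hc ht hm ho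
        · obtain ⟨he, hm⟩ := pv_bump_eq ho p
          rcases hq : pvBump (o, os) (PySem.Str.strip p) with ⟨l', s'⟩
          rw [hq] at he hm
          simp only [h1, h2, h3, Bool.not_true, Bool.not_false, Bool.false_and, Bool.true_and,
            Bool.and_false, Bool.and_true, Bool.and_self, if_true, if_false, Bool.false_eq_true,
            Bool.not_eq_true, List.foldl_cons, hq]
          rw [← he]
          exact ih _ _ _ _ _ _ _ _ hc ht hd hm

-- ===== VERDICT (by name: the statement is the Claim_ definition above) =====
theorem classify_paths_py_spec : Claim_equal_classify_paths_py := by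
  intro paths _
  have hb := pv_b_fold paths [] [] [] [] [] [] [] []
    (fun _ => Iff.rfl) (fun _ => Iff.rfl) (fun _ => Iff.rfl) (fun _ => Iff.rfl)
  unfold Spec_classify_paths_py
  simp only [classify_paths_py, classify_paths_py_alt, pvDedupeTextItems, pv_classify_fold,
    List.nil_append]
  exact hb.symm
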